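-- pv_equiv track=rewrite | github.com/ItsMikeyy/455as2 | a2.py | is_valid_line
-- ===== SOURCE A (Python) =====
-- def is_valid_line(line):
--     count_zero = count_one = 0
--     consecutive = 1
--     for i in range(len(line)):
--         if line[i] is not None:
--             if i > 0 and line[i] == line[i - 1]:
--                 consecutive += 1
--                 if consecutive >= 3:
--                     return False
--             else:
--                 consecutive = 1
--             if line[i] == 0:
--                 count_zero += 1
--             else:
--                 count_one += 1
--         else:
--             consecutive = 1
--     if count_zero > len(line) // 2 or count_one > len(line) // 2:
--         return False
--     return True
-- ===== SOURCE B (Python) =====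
-- def rle(xs):
--     """Run-length encode xs into a list of (value, length) maximal runs."""
--     runs = []
--     i = 0
--     while i < len(xs):
--         j = i + 1
--         while j < len(xs) and xs[j] == xs[i]:
--             j += 1
--         runs.append((xs[i], j - i))
--         i = j
--     return runs
--
-- def is_valid_line(line):
--     runs = rle(line)
--     if any(v is not None and r >= 3 for v, r in runs):
--         return False
--     half = len(line) // 2
--     count_zero = sum(r for v, r in runs if v is not None and v == 0)
--     count_one = sum(r for v, r in runs if v is not None and v != 0)
--     return count_zero <= half and count_one <= half
-- ===== Notes on version B (the rewrite author's own statement) =====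
-- stated objective: alternative
-- what changed: Replaces A's single stateful index loop (running consecutive-counter and two count accumulators updated together, early return) by a run-length-encoding pipeline: first compress the line into a list of (value, length) runs, then judge everything on that run list - any() over runs for a run of length >= 3, and two sum() comprehensions over runs for the zero/one counts.
import Mathlib
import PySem

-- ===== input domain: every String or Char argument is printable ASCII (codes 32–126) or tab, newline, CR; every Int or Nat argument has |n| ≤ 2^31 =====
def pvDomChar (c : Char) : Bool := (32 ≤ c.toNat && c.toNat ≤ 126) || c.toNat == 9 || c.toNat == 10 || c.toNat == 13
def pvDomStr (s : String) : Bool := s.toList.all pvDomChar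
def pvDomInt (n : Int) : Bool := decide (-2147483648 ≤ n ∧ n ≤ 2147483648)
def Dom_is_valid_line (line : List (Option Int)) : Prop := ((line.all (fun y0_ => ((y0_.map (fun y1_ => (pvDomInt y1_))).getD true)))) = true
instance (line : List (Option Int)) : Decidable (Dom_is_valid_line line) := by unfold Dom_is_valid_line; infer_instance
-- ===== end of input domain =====

-- B replaces A's single stateful index loop by a run-length-encoding pipeline: build the
-- list of (value, length) runs first, then judge runs (any length ≥ 3) and sum counts from
-- the run list; objective: alternative decomposition, same asymptotic cost.

-- ===== PORT A =====
-- the Python for-loop with its three accumulators and early 'return False'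
def is_valid_line_loop (line : List (Option Int)) (i : Nat)
    (count_zero count_one consecutive : Int) : Bool :=
  if _h : i < line.length then
    match line.getD i none with
    | some v =>
      -- 'if i > 0 and line[i] == line[i-1]' (comparison with a None neighbour is False)
      if 0 < i ∧ line.getD (i - 1) none = some v then
        if consecutive + 1 ≥ 3 then false
        else if v = 0 then
          is_valid_line_loop line (i + 1) (count_zero + 1) count_one (consecutive + 1)
        else
          is_valid_line_loop line (i + 1) count_zero (count_one + 1) (consecutive + 1)
      else if v = 0 then
        is_valid_line_loop line (i + 1) (count_zero + 1) count_one 1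
      else
        is_valid_line_loop line (i + 1) count_zero (count_one + 1) 1
    | none => is_valid_line_loop line (i + 1) count_zero count_one 1
  else
    !(count_zero > PySem.Int.floordiv (line.length : Int) 2 ||
      count_one > PySem.Int.floordiv (line.length : Int) 2)
termination_by line.length - i

def is_valid_line (line : List (Option Int)) : Bool :=
  is_valid_line_loop line 0 0 0 1

-- ===== PORT B =====
-- Source B's rle: the outer while-loop over suffixes; the inner 'while xs[j] == xs[i]' counting
-- the current run is the takeWhile length, and 'i = j' is the corresponding drop
def pvRle (xs : List (Option Int)) : List (Option Int × Int) :=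
  match xs with
  | [] => []
  | x :: rest =>
    let run := rest.takeWhile (fun y => y = x)
    (x, (run.length : Int) + 1) :: pvRle (rest.drop run.length)
termination_by xs.length
decreasing_by simp

def is_valid_line_alt (line : List (Option Int)) : Bool :=
  let runs := pvRle line
  if runs.any (fun p => p.1 ≠ none ∧ 3 ≤ p.2) then false
  else
    let half := PySem.Int.floordiv (line.length : Int) 2
    let count_zero := ((runs.filter (fun p => p.1 ≠ none ∧ p.1 = some 0)).map Prod.snd).sum
    let count_one := ((runs.filter (fun p => p.1 ≠ none ∧ p.1 ≠ some 0)).map Prod.snd).sum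
    decide (count_zero ≤ half ∧ count_one ≤ half)

-- ===== PRECONDITION & SPEC =====
def Spec_is_valid_line (line : List (Option Int)) (out : Bool) : Prop := out = is_valid_line_alt line
instance (line : List (Option Int)) (out : Bool) : Decidable (Spec_is_valid_line line out) := by unfold Spec_is_valid_line; infer_instance

-- ===== CLAIM (what is proved, stated in full; the proofs are below) =====
def Claim_equal_is_valid_line : Prop := ∀ (line : List (Option Int)), Dom_is_valid_line line → Spec_is_valid_line line (is_valid_line line)

-- ===== LEMMAS AND PROOFS =====

-- A's loop re-expressed as structural recursion on the remaining suffix, with 'prev' the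
-- previous element (none also when i = 0) and n the fixed half-length threshold.
def pvRunA : Option Int → List (Option Int) → Int → Int → Int → Int → Bool
  | _, [], cz, co, _, n => !(cz > n || co > n)
  | prev, x :: xs, cz, co, cons, n =>
    match x with
    | none => pvRunA none xs cz co 1 n
    | some v =>
      if prev = some v then
        if cons + 1 ≥ 3 then false
        else if v = 0 then pvRunA (some v) xs (cz + 1) co (cons + 1) n
        else pvRunA (some v) xs cz (co + 1) (cons + 1) n
      else if v = 0 then pvRunA (some v) xs (cz + 1) co 1 n
      else pvRunA (some v) xs cz (co + 1) 1 n

def pvPrevAt (line : List (Option Int)) (i : Nat) : Option Int :=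
  if i = 0 then none else line.getD (i - 1) none

-- the 3-in-a-row scan carrying A's (prev, consecutive) state
def pvScanF : Option Int → Int → List (Option Int) → Bool
  | _, _, [] => true
  | prev, cons, x :: xs =>
    match x with
    | none => pvScanF none 1 xs
    | some v =>
      if prev = some v then
        if cons + 1 ≥ 3 then false else pvScanF (some v) (cons + 1) xs
      else pvScanF (some v) 1 xs

def pvCnt0 : List (Option Int) → Int
  | [] => 0
  | none :: xs => pvCnt0 xs
  | some v :: xs => if v = 0 then 1 + pvCnt0 xs else pvCnt0 xs

def pvCnt1 : List (Option Int) → Int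
  | [] => 0
  | none :: xs => pvCnt1 xs
  | some v :: xs => if v = 0 then pvCnt1 xs else 1 + pvCnt1 xs

lemma pvLoop_eq_runA : ∀ (rest : List (Option Int)) (l : List (Option Int)) (i : Nat)
    (cz co cons : Int), l.drop i = rest →
    is_valid_line_loop l i cz co cons =
      pvRunA (pvPrevAt l i) rest cz co cons (PySem.Int.floordiv (l.length : Int) 2) := by
  intro rest
  induction rest with
  | nil =>
    intro l i cz co cons h
    have hlen : l.length ≤ i := by
      by_contra hc
      push_neg at hc
      have := List.drop_eq_nil_iff.mp h
      omega
    rw [is_valid_line_loop]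
    simp [pvRunA, Nat.not_lt.mpr hlen]
  | cons x xs ih =>
    intro l i cz co cons h
    have hi : i < l.length := by
      by_contra hc
      push_neg at hc
      rw [List.drop_eq_nil_iff.mpr hc] at h
      simp at h
    have hget : l[i]? = some x := by
      have h2 : (l.drop i)[0]? = l[i]? := by simp [List.getElem?_drop]
      rw [h] at h2
      simpa using h2.symm
    have hgetD : l.getD i none = x := by simp [List.getD, hget]
    have hdrop : l.drop (i + 1) = xs := by
      have : l.drop (i + 1) = (l.drop i).tail := by
        rw [← List.drop_drop]
        simp
      simp [this, h]
    have hprev : pvPrevAt l (i + 1) = x := by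
      simp [pvPrevAt, List.getD, hget]
    rw [is_valid_line_loop]
    simp only [hi, dif_pos, hgetD]
    cases x with
    | none =>
      simp only [pvRunA]
      rw [ih l (i + 1) cz co 1 hdrop, hprev]
    | some v =>
      have hcond : (0 < i ∧ l.getD (i - 1) none = some v) ↔ pvPrevAt l i = some v := by
        constructor
        · rintro ⟨h1, h2⟩
          unfold pvPrevAt
          rw [if_neg (by omega)]
          exact h2
        · intro hp
          unfold pvPrevAt at hp
          by_cases h0 : i = 0
          · simp [h0] at hp
          · simp [h0] at hp
            exact ⟨Nat.pos_of_ne_zero h0, hp⟩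
      simp only [pvRunA]
      by_cases hp : pvPrevAt l i = some v
      · rw [if_pos (hcond.mpr hp), if_pos hp]
        by_cases h3 : cons + 1 ≥ 3
        · simp [h3]
        · simp only [if_neg h3]
          by_cases hv : v = 0
          · simp only [if_pos hv]
            rw [ih l (i + 1) (cz + 1) co (cons + 1) hdrop, hprev]
          · simp only [if_neg hv]
            rw [ih l (i + 1) cz (co + 1) (cons + 1) hdrop, hprev]
      · rw [if_neg (fun hc => hp (hcond.mp hc)), if_neg hp]
        by_cases hv : v = 0
        · simp only [if_pos hv]
          rw [ih l (i + 1) (cz + 1) co 1 hdrop, hprev]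
        · simp only [if_neg hv]
          rw [ih l (i + 1) cz (co + 1) 1 hdrop, hprev]

lemma pvRunA_split : ∀ (rest : List (Option Int)) (prev : Option Int) (cz co cons n : Int),
    pvRunA prev rest cz co cons n =
      (pvScanF prev cons rest && !(cz + pvCnt0 rest > n || co + pvCnt1 rest > n)) := by
  intro rest
  induction rest with
  | nil => intro prev cz co cons n; simp [pvRunA, pvScanF, pvCnt0, pvCnt1]
  | cons x xs ih =>
    intro prev cz co cons n
    cases x with
    | none =>
      simp only [pvRunA, pvScanF, pvCnt0, pvCnt1]
      exact ih none cz co 1 n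
    | some v =>
      simp only [pvRunA, pvScanF, pvCnt0, pvCnt1]
      by_cases hp : prev = some v
      · simp only [if_pos hp]
        by_cases h3 : cons + 1 ≥ 3
        · simp [h3]
        · simp only [if_neg h3]
          by_cases hv : v = 0
          · simp only [if_pos hv]
            rw [ih (some v) (cz + 1) co (cons + 1) n]
            have : cz + 1 + pvCnt0 xs = cz + (1 + pvCnt0 xs) := by ring
            rw [this]
          · simp only [if_neg hv]
            rw [ih (some v) cz (co + 1) (cons + 1) n]
            have : co + 1 + pvCnt1 xs = co + (1 + pvCnt1 xs) := by ring
            rw [this]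
      · simp only [if_neg hp]
        by_cases hv : v = 0
        · simp only [if_pos hv]
          rw [ih (some v) (cz + 1) co 1 n]
          have : cz + 1 + pvCnt0 xs = cz + (1 + pvCnt0 xs) := by ring
          rw [this]
        · simp only [if_neg hv]
          rw [ih (some v) cz (co + 1) 1 n]
          have : co + 1 + pvCnt1 xs = co + (1 + pvCnt1 xs) := by ring
          rw [this]

-- a mismatch at the head of the tail resets the scan state (cons is unused on a mismatch)
lemma pvScanF_reset (tail : List (Option Int)) (p : Option Int) (c : Int)
    (h : ∀ w : Int, tail.head? = some (some w) → p ≠ some w) :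
    pvScanF p c tail = pvScanF none 1 tail := by
  cases tail with
  | nil => rfl
  | cons y ys =>
    cases y with
    | none => rfl
    | some w =>
      have hp : p ≠ some w := h w (by simp)
      simp [pvScanF, hp]

-- scanning a run of k equal non-None values starting with counter c
lemma pvScanF_run : ∀ (k : Nat) (v : Int) (c : Int) (tail : List (Option Int)),
    (∀ w : Int, tail.head? = some (some w) → (v : Int) ≠ w) →
    pvScanF (some v) c (List.replicate k (some v) ++ tail) =
      if 1 ≤ k ∧ 3 ≤ c + k then false else pvScanF none 1 tail := by
  intro k
  induction k with
  | zero =>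
    intro v c tail h
    simp only [List.replicate, List.nil_append]
    rw [if_neg (by omega)]
    exact pvScanF_reset tail (some v) c (fun w hw hvw => h w hw (by injection hvw))
  | succ k ih =>
    intro v c tail h
    have hstep : pvScanF (some v) c (List.replicate (k + 1) (some v) ++ tail)
        = if c + 1 ≥ 3 then false
          else pvScanF (some v) (c + 1) (List.replicate k (some v) ++ tail) := by
      simp [List.replicate_succ, pvScanF]
    rw [hstep]
    by_cases h3 : c + 1 ≥ 3
    · rw [if_pos h3, if_pos ⟨by omega, by push_cast; omega⟩]
    · rw [if_neg h3, ih v (c + 1) tail h]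
      by_cases hk : 1 ≤ k ∧ 3 ≤ c + 1 + (k : Int)
      · rw [if_pos hk, if_pos ⟨by omega, by push_cast; omega⟩]
      · rw [if_neg hk, if_neg (by push_cast; push_cast at hk; omega)]

lemma pvScanF_none_run : ∀ (k : Nat) (tail : List (Option Int)),
    pvScanF none 1 (List.replicate k none ++ tail) = pvScanF none 1 tail := by
  intro k
  induction k with
  | zero => intro tail; simp
  | succ k ih => intro tail; simp only [List.replicate_succ, List.cons_append, pvScanF]; exact ih tail

lemma pvCnt0_append (a b : List (Option Int)) : pvCnt0 (a ++ b) = pvCnt0 a + pvCnt0 b := by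
  induction a with
  | nil => simp [pvCnt0]
  | cons x xs ih =>
    cases x with
    | none => simpa [pvCnt0] using ih
    | some v =>
      by_cases hv : v = 0 <;> simp [pvCnt0, hv, ih] <;> ring

lemma pvCnt1_append (a b : List (Option Int)) : pvCnt1 (a ++ b) = pvCnt1 a + pvCnt1 b := by
  induction a with
  | nil => simp [pvCnt1]
  | cons x xs ih =>
    cases x with
    | none => simpa [pvCnt1] using ih
    | some v =>
      by_cases hv : v = 0 <;> simp [pvCnt1, hv, ih] <;> ring

lemma pvCnt0_replicate (k : Nat) (x : Option Int) :
    pvCnt0 (List.replicate k x) = if x = some 0 then (k : Int) else 0 := by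
  induction k with
  | zero => simp [pvCnt0]
  | succ k ih =>
    cases x with
    | none => simp [List.replicate_succ, pvCnt0, ih]
    | some v =>
      by_cases hv : v = 0
      · subst hv
        simp [List.replicate_succ, pvCnt0, ih]
        push_cast
        ring
      · simp [List.replicate_succ, pvCnt0, hv, ih]

lemma pvCnt1_replicate (k : Nat) (x : Option Int) :
    pvCnt1 (List.replicate k x) = if x ≠ none ∧ x ≠ some 0 then (k : Int) else 0 := by
  induction k with
  | zero => simp [pvCnt1]
  | succ k ih =>
    cases x with
    | none => simp [List.replicate_succ, pvCnt1, ih]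
    | some v =>
      by_cases hv : v = 0
      · subst hv
        simp [List.replicate_succ, pvCnt1, ih]
      · simp [List.replicate_succ, pvCnt1, hv, ih]
        push_cast
        ring

-- decomposition facts for one step of pvRle
lemma pvTakeWhile_replicate (x : Option Int) (xs : List (Option Int)) :
    xs.takeWhile (fun y => y = x) = List.replicate (xs.takeWhile (fun y => y = x)).length x := by
  apply List.eq_replicate_of_mem
  intro b hb
  have := List.mem_takeWhile_imp hb
  simpa using this

lemma pvDrop_takeWhile (x : Option Int) : ∀ (xs : List (Option Int)),
    xs.drop (xs.takeWhile (fun y => y = x)).length = xs.dropWhile (fun y => y = x) := by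
  intro xs
  induction xs with
  | nil => rfl
  | cons y ys ih =>
    by_cases hy : y = x
    · simp [List.takeWhile_cons, List.dropWhile_cons, hy, ih]
    · simp [List.takeWhile_cons, List.dropWhile_cons, hy]

lemma pvDropWhile_head (x : Option Int) : ∀ (xs : List (Option Int)) (z : Option Int),
    (xs.dropWhile (fun y => y = x)).head? = some z → z ≠ x := by
  intro xs
  induction xs with
  | nil => intro z h; simp at h
  | cons y ys ih =>
    intro z h
    by_cases hy : y = x
    · rw [List.dropWhile_cons, if_pos (by simpa using hy)] at h
      exact ih z h
    · rw [List.dropWhile_cons, if_neg (by simpa using hy)] at h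
      simp at h
      subst h
      exact hy

-- the three facts proved together along pvRle's recursion, by fuel on the length
lemma pvRle_main : ∀ (n : Nat) (xs : List (Option Int)), xs.length ≤ n →
    (pvScanF none 1 xs = !((pvRle xs).any (fun p => p.1 ≠ none ∧ 3 ≤ p.2))) ∧
    (pvCnt0 xs = (((pvRle xs).filter (fun p => p.1 ≠ none ∧ p.1 = some 0)).map Prod.snd).sum) ∧
    (pvCnt1 xs = (((pvRle xs).filter (fun p => p.1 ≠ none ∧ p.1 ≠ some 0)).map Prod.snd).sum) := by
  intro n
  induction n with
  | zero =>
    intro xs h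
    have hxs : xs = [] := List.eq_nil_of_length_eq_zero (by omega)
    subst hxs
    refine ⟨by simp [pvRle, pvScanF], by simp [pvRle, pvCnt0], by simp [pvRle, pvCnt1]⟩
  | succ n ih =>
    intro xs h
    cases xs with
    | nil => refine ⟨by simp [pvRle, pvScanF], by simp [pvRle, pvCnt0], by simp [pvRle, pvCnt1]⟩
    | cons x rest =>
      have hsplit : rest = List.replicate (rest.takeWhile (fun y => y = x)).length x
          ++ rest.drop (rest.takeWhile (fun y => y = x)).length := by
        conv_lhs => rw [← List.takeWhile_append_dropWhile (p := fun y => y = x) (l := rest)]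
        rw [← pvDrop_takeWhile x rest, ← pvTakeWhile_replicate x rest]
      generalize hk : (rest.takeWhile (fun y => y = x)).length = k at hsplit
      have htail : rest.drop k = rest.dropWhile (fun y => y = x) := by
        rw [← hk]
        exact pvDrop_takeWhile x rest
      have htl : (rest.drop k).length ≤ n := by
        have h' : rest.length + 1 ≤ n + 1 := by simpa using h
        have hd : (rest.drop k).length = rest.length - k := by simp
        omega
      have hrle : pvRle (x :: rest) = (x, (k : Int) + 1) :: pvRle (rest.drop k) := by
        conv_lhs => rw [pvRle]
        rw [hk]
      have htailhd : ∀ z : Option Int, (rest.drop k).head? = some z → z ≠ x := by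
        intro z hz
        rw [htail] at hz
        exact pvDropWhile_head x rest z hz
      have hxs : x :: rest = List.replicate (k + 1) x ++ rest.drop k := by
        rw [List.replicate_succ, List.cons_append, ← hsplit]
      obtain ⟨ihs, ih0, ih1⟩ := ih (rest.drop k) htl
      refine ⟨?_, ?_, ?_⟩
      · -- scan part
        rw [hrle, hxs]
        cases x with
        | none =>
          rw [pvScanF_none_run (k + 1) (rest.drop k), ihs]
          simp
        | some v =>
          rw [List.replicate_succ, List.cons_append]
          have hstep : pvScanF none 1 (some v :: (List.replicate k (some v) ++ rest.drop k)) =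
              pvScanF (some v) 1 (List.replicate k (some v) ++ rest.drop k) := by
            simp [pvScanF]
          rw [hstep, pvScanF_run k v 1 (rest.drop k)
            (fun w hw hvw => htailhd (some w) hw (by rw [hvw]))]
          by_cases hc : 1 ≤ k ∧ 3 ≤ (1 : Int) + k
          · rw [if_pos hc]
            have h3 : (3 : Int) ≤ (k : Int) + 1 := by omega
            simp [List.any_cons, h3]
          · rw [if_neg hc, ihs]
            have h3 : ¬ (3 : Int) ≤ (k : Int) + 1 := by omega
            simp [List.any_cons, h3]
      · -- zero count
        rw [hrle, hxs, pvCnt0_append, pvCnt0_replicate, ih0]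
        by_cases hx : x = some 0
        · rw [if_pos hx]
          have hp : (x ≠ none ∧ x = some 0) := ⟨by rw [hx]; simp, hx⟩
          simp only [List.filter_cons, decide_eq_true_eq, if_pos hp, List.map_cons,
            List.sum_cons]
          push_cast
          ring
        · rw [if_neg hx]
          have hp : ¬ (x ≠ none ∧ x = some 0) := fun hh => hx hh.2
          simp only [List.filter_cons, decide_eq_true_eq, if_neg hp]
          ring
      · -- one count
        rw [hrle, hxs, pvCnt1_append, pvCnt1_replicate, ih1]
        by_cases hx : x ≠ none ∧ x ≠ some 0
        · rw [if_pos hx]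
          have hp : ((x, (k : Int) + 1).1 ≠ none ∧ (x, (k : Int) + 1).1 ≠ some 0) := hx
          simp only [List.filter_cons, decide_eq_true_eq, if_pos hp, List.map_cons,
            List.sum_cons]
          push_cast
          ring
        · rw [if_neg hx]
          simp only [List.filter_cons, decide_eq_true_eq, if_neg hx]
          ring

-- ===== VERDICT (by name: the statement is the Claim_ definition above) =====
theorem is_valid_line_spec : Claim_equal_is_valid_line := by
  intro line _
  unfold Spec_is_valid_line is_valid_line
  rw [pvLoop_eq_runA line line 0 0 0 1 (by simp)]
  have hprev0 : pvPrevAt line 0 = none := by simp [pvPrevAt]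
  rw [hprev0, pvRunA_split]
  obtain ⟨hs, h0, h1⟩ := pvRle_main line.length line (le_refl _)
  unfold is_valid_line_alt
  simp only [zero_add]
  rw [h0, h1, hs]
  cases hany : (pvRle line).any (fun p => p.1 ≠ none ∧ 3 ≤ p.2) with
  | true => simp [hany]
  | false =>
    simp only [hany, Bool.not_false, Bool.true_and, Bool.false_eq_true, if_false]
    set half := PySem.Int.floordiv (line.length : Int) 2 with hhalf
    set a := (((pvRle line).filter (fun p => p.1 ≠ none ∧ p.1 = some 0)).map Prod.snd).sum
      with ha'
    set b := (((pvRle line).filter (fun p => p.1 ≠ none ∧ p.1 ≠ some 0)).map Prod.snd).sum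
      with hb'
    by_cases hA : a ≤ half <;> by_cases hB : b ≤ half <;> simp [hA, hB] <;> omega
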